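-- pv_equiv track=rewrite | github.com/KScaesar/algo-practice | Sliding_Window/2026_0322_interview_Q3_Shortest_Fragment.py | solution
-- ===== SOURCE A (Python) =====
-- def solution(A, L, R):
--     # ─── 題目要求解析 (釐清題意) ────────────────────────────────────────────────
--     # 題目：「最短的連續子陣列 (fragment)，包含從 L 到 R 的『每一個』整數」
--     # 注意盲點：
--     # 1. 不是只包含 L 和 R 這兩個點，而是 {L, L+1, ..., R} 共 R-L+1 個「不同的數字」都要出現。
--     # 2. 例如 L=3, R=5，必須要有 3, 4, 5。只要缺了 4，就算包住 3 和 5 也是不合法的（回傳 -1）。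
--     # 3. 陣列裡可能有不在 [L, R] 範圍內的數字 (例如過大或過小的數字)，這些是「雜訊」，
--     #    把它們包在區間裡沒關係，但它們對「達成條件」沒有幫助。
--     #
--     # ─── 設計思路 (Sliding Window 收縮型) ───────────────────────────────────────
--     # 只要看到「找符合某條件」的「最短/最長連續區間」，第一直覺就是 Sliding Window。
--     #
--     # 1. 狀態追蹤：
--     #    - `need`: 目標需要集齊幾種不同的數字 (R - L + 1)。
--     #    - `have`: 目前 window 內已經集齊了幾種「我們需要的」數字。
--     #    - `window_count`: dict，只記錄 [L, R] 範圍內的數字在 window 的出現次數。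
--     #      (L, R 最大值高達 10^9，不能開陣列對應 index，必須用 Hash Map，且過濾掉雜訊以省空間)
--     #
--     # 2. 擴張 (Expand) - right 往前走：
--     #    - 吃進右邊新元素，如果是我們要的 (L <= val <= R)，計數 +1。
--     #    - 當這個數字是「第一次」出現時 (count == 1)，代表我們湊齊了一種數字 (have += 1)。
--     #
--     # 3. 收縮 (Shrink) - left 往前走：
--     #    - 當 `have == need` 時，代表目前區間合法，先記錄當前長度 `right - left + 1`更新最佳解。
--     #    - 接著嘗試「吐出」最左邊的元素 (left += 1)，看看區間還能不能更短。
--     #    - 如果吐出的是目標數字，且計數歸 0，代表破壞了合法狀態 (have -= 1)，就必須停止收縮，繼續向右擴張。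
--     #
--     # ─── 複雜度分析 ─────────────────────────────────────────────────────────────
--     # [時間複雜度] O(N)
--     #   - 雖然 for 裡面包著 while，但 right 最多往右走 N 步，left 也只加不減，最多走 N 步。
--     #   - 每個元素最多被「吃進視窗」一次、「吐出視窗」一次。這叫作「攤還分析 (Amortized Analysis)」。
--     # [空間複雜度] O(min(N, R - L + 1))
--     #   - 我們只將 [L, R] 內的「有效數字」記錄進 `window_count` 字典，最大 key 類型有 R-L+1 種。
--     #   - 而最差狀況把整個陣列塞滿字典，key 數量也不會超過 N。
--     #   - 取決於誰更小，空間將被嚴格約束在 min(N, R-L+1) 以內。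
--     #   - 這巧妙防禦了 L 和 R 可能高達 10^9 所引發的問題，若改宣告陣列來存計數，則會爆擊記憶體上限 (MLE)。
--     # ────────────────────────────────────────────────────────────────────────
--
--     need = R - L + 1  # 需要涵蓋的不同整數個數
--     window_count = {}  # 當前 window 內 [L,R] 各值的出現次數
--     have = 0  # 目前已涵蓋的不同整數個數
--     min_len = float("inf")
--     left = 0
--
--     for right in range(len(A)):
--         r_val = A[right]
--
--         # 只追蹤落在 [L, R] 範圍內的元素
--         if L <= r_val <= R:
--             window_count[r_val] = window_count.get(r_val, 0) + 1
--             if window_count[r_val] == 1:  # 這個值第一次出現 → 新增一個覆蓋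
--                 have += 1
--
--         # 當滿足條件，嘗試從左側縮小 window
--         while have == need:
--             min_len = min(min_len, right - left + 1)
--
--             l_val = A[left]
--             if L <= l_val <= R:
--                 window_count[l_val] -= 1
--                 if window_count[l_val] == 0:  # 這個值消失了 → 失去一個覆蓋
--                     have -= 1
--             left += 1
--
--     return min_len if min_len != float("inf") else -1
-- ===== SOURCE B (Python) =====
-- def solution(A, L, R):
--     # Different decomposition: no left pointer, no have counter, no shrink loop.
--     # Track the most recent index of each required value; once all are seen, the
--     # shortest valid window ending at `right` starts at min(last_pos.values()).
--     need = R - L + 1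
--     last_pos = {}
--     min_len = float("inf")
--     for right in range(len(A)):
--         v = A[right]
--         if L <= v <= R:
--             last_pos[v] = right
--         if len(last_pos) == need:
--             min_len = min(min_len, right - min(last_pos.values()) + 1)
--     return min_len if min_len != float("inf") else -1
-- ===== Notes on version B (the rewrite author's own statement) =====
-- stated objective: alternative
-- what changed: Replaces the two-pointer shrink loop (left pointer, have counter, per-value window counts) by a single pass that records each required value's most recent index in a dict and, once all R-L+1 values have been seen, takes right - min(last_pos.values()) + 1 as the best window ending at right; it trades A's amortised O(N) for O(N*K) min scans.
import Mathlib
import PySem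

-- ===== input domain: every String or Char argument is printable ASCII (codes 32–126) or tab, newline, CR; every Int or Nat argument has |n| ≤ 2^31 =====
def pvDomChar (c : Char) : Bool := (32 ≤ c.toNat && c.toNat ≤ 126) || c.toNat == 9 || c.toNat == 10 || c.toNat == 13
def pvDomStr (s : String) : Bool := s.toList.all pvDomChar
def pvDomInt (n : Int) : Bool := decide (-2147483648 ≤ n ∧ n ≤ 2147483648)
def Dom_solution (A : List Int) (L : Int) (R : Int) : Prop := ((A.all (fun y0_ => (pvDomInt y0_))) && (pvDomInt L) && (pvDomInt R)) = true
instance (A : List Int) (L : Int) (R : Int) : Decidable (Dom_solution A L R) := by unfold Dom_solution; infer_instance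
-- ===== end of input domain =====

-- B replaces A's shrink-loop sliding window by a last-position dict with a min scan
-- (alternative decomposition, not faster); equal return value on all of Pre_.

-- Python's min(m, x) where m may be the float('inf') sentinel (none = still infinite).
def pyMinOpt (ml : Option Int) (x : Int) : Option Int :=
  match ml with
  | none => some x
  | some c => some (min c x)

-- ===== PORT A =====
-- the inner `while have == need` loop of A; recursion on the remaining room for `left`.
def solutionShrink (A : List Int) (L R need : Int) (r : Nat)
    (wc : PySem.Dict Int Int) (hv : Int) (ml : Option Int) (left : Nat) :
    PySem.Dict Int Int × Int × Option Int × Nat :=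
  if hv = need then
    let ml' := pyMinOpt ml ((r : Int) - (left : Int) + 1)
    if h : left < A.length then
      let lv := A[left]
      if L ≤ lv ∧ lv ≤ R then
        let wc' := wc.insert lv (wc.getD lv 0 - 1)
        let hv' := if wc'.getD lv 0 = 0 then hv - 1 else hv
        solutionShrink A L R need r wc' hv' ml' (left + 1)
      else
        solutionShrink A L R need r wc hv ml' (left + 1)
    else (wc, hv, ml', left)   -- Python raises IndexError here (outside Pre_)
  else (wc, hv, ml, left)
termination_by A.length - left

def solution (A : List Int) (L : Int) (R : Int) : Int :=
  let need := R - L + 1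
  let st := (List.range A.length).foldl
    (fun st r =>
      let wc := st.1; let hv := st.2.1; let ml := st.2.2.1; let left := st.2.2.2
      let rv := A.getD r 0
      let st2 :=
        if L ≤ rv ∧ rv ≤ R then
          let wc' := wc.insert rv (wc.getD rv 0 + 1)
          (wc', if wc'.getD rv 0 = 1 then hv + 1 else hv)
        else (wc, hv)
      solutionShrink A L R need r st2.1 st2.2 ml left)
    ((PySem.Dict.empty : PySem.Dict Int Int), (0 : Int), (none : Option Int), (0 : Nat))
  match st.2.2.1 with
  | some m => m
  | none => -1

-- ===== PORT B =====
def solution_alt (A : List Int) (L : Int) (R : Int) : Int :=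
  let need := R - L + 1
  let st := (List.range A.length).foldl
    (fun (st : PySem.Dict Int Int × Option Int) r =>
      let lp := st.1; let ml := st.2
      let v := A.getD r 0
      let lp' := if L ≤ v ∧ v ≤ R then lp.insert v (r : Int) else lp
      let ml' :=
        if (lp'.size : Int) = need then
          match PySem.List.min? lp'.values (fun x => x) with
          | some m => pyMinOpt ml ((r : Int) - m + 1)
          | none => ml   -- Python raises ValueError (min of empty) here (outside Pre_)
        else ml
      (lp', ml'))
    ((PySem.Dict.empty : PySem.Dict Int Int), (none : Option Int))
  match st.2 with
  | some m => m
  | none => -1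

-- ===== PRECONDITION & SPEC =====
-- Pre_ excludes exactly the inputs where the Python programs raise: a non-empty A with
-- R - L + 1 = 0 makes A's while-loop run off the array (IndexError; B's min() of an
-- empty dict raises ValueError there too).
def Pre_solution (A : List Int) (L : Int) (R : Int) : Prop := R - L + 1 ≠ 0 ∨ A = []
instance (A : List Int) (L : Int) (R : Int) : Decidable (Pre_solution A L R) := by
  unfold Pre_solution; infer_instance
def pvWitness_solution : List Int × Int × Int := ([1, 3, 2, 9, 2], 1, 3)

def Spec_solution (A : List Int) (L : Int) (R : Int) (out : Int) : Prop := out = solution_alt A L R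
instance (A : List Int) (L : Int) (R : Int) (out : Int) : Decidable (Spec_solution A L R out) := by
  unfold Spec_solution; infer_instance

-- ===== CLAIM (what is proved, stated in full; the proofs are below) =====
def Claim_equal_solution : Prop := ∀ (A : List Int) (L : Int) (R : Int), Dom_solution A L R → Pre_solution A L R → Spec_solution A L R (solution A L R)

-- ===== LEMMAS AND PROOFS =====

def lastIdx (P : List Int) (v : Int) : Option Nat :=
  P.zipIdx.foldl (fun acc xi => if xi.1 = v then some xi.2 else acc) none

theorem lastIdx_snoc (P : List Int) (x v : Int) :
    lastIdx (P ++ [x]) v = if x = v then some P.length else lastIdx P v := by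
  simp [lastIdx, List.zipIdx_append, List.foldl_append]

theorem lastIdx_isSome_iff (P : List Int) (v : Int) :
    (lastIdx P v).isSome ↔ v ∈ P := by
  induction P using List.reverseRecOn with
  | nil => simp [lastIdx]
  | append_singleton P x ih =>
    rw [lastIdx_snoc]
    by_cases h : x = v <;> simp [h, ih]
    intro hv
    exact absurd hv.symm h

theorem lastIdx_lt (P : List Int) (v : Int) (i : Nat) (h : lastIdx P v = some i) :
    i < P.length := by
  induction P using List.reverseRecOn generalizing i with
  | nil => simp [lastIdx] at h
  | append_singleton P x ih =>
    rw [lastIdx_snoc] at h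
    by_cases hx : x = v
    · simp [hx] at h; simp [← h]
    · simp [hx] at h; have := ih _ h; simp; omega

theorem lastIdx_getD (P : List Int) (v : Int) (i : Nat) (h : lastIdx P v = some i) :
    P.getD i 0 = v := by
  induction P using List.reverseRecOn generalizing i with
  | nil => simp [lastIdx] at h
  | append_singleton P x ih =>
    rw [lastIdx_snoc] at h
    by_cases hx : x = v
    · simp [hx] at h
      subst h
      simp [hx]
    · simp [hx] at h
      have hlt := lastIdx_lt P v i h
      rw [List.getD_append _ _ _ _ hlt]  -- may need name fix
      exact ih _ h

theorem mem_drop_iff_lastIdx (P : List Int) (v : Int) (j : Nat) :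
    v ∈ P.drop j ↔ ∃ i, lastIdx P v = some i ∧ j ≤ i := by
  induction P using List.reverseRecOn with
  | nil => simp [lastIdx]
  | append_singleton P x ih =>
    by_cases hj : j ≤ P.length
    · rw [List.drop_append_of_le_length hj]
      rw [lastIdx_snoc]
      by_cases hx : x = v
      · simp [hx]
        exact hj
      · simp [hx, ih]
        intro hv
        exact absurd hv.symm hx
    · have : P.length + 1 ≤ j := by omega
      rw [List.drop_eq_nil_of_le (by simp; omega)]
      simp
      intro i hi
      have := lastIdx_lt _ _ _ hi
      simp at this
      omega

-- distinct required values of P, in first-occurrence order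
def dsetL (L R : Int) (P : List Int) : List Int :=
  PySem.Set.ofList (P.filter (fun v => decide (L ≤ v ∧ v ≤ R)))

def lpF (L R : Int) (P : List Int) : PySem.Dict Int Int :=
  P.zipIdx.foldl
    (fun d xi => if L ≤ xi.1 ∧ xi.1 ≤ R then d.insert xi.1 (xi.2 : Int) else d)
    PySem.Dict.empty

theorem dsetL_snoc (L R : Int) (P : List Int) (x : Int) :
    dsetL L R (P ++ [x]) =
      if L ≤ x ∧ x ≤ R then PySem.Set.add (dsetL L R P) x else dsetL L R P := by
  by_cases h : L ≤ x ∧ x ≤ R <;>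
    simp [dsetL, h, List.filter_append, PySem.Set.ofList_eq_foldl, List.foldl_append]

theorem mem_dsetL (L R : Int) (P : List Int) (v : Int) :
    v ∈ dsetL L R P ↔ (L ≤ v ∧ v ≤ R) ∧ v ∈ P := by
  simp [dsetL, PySem.Set.mem_ofList, List.mem_filter, and_comm]

theorem nodup_dsetL (L R : Int) (P : List Int) : (dsetL L R P).Nodup :=
  PySem.Set.nodup_ofList _

theorem lpF_snoc (L R : Int) (P : List Int) (x : Int) :
    lpF L R (P ++ [x]) =
      if L ≤ x ∧ x ≤ R then (lpF L R P).insert x (P.length : Int) else lpF L R P := by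
  by_cases h : L ≤ x ∧ x ≤ R <;>
    simp [lpF, h, List.zipIdx_append, List.foldl_append]

theorem lpF_get? (L R : Int) (P : List Int) (v : Int) :
    (lpF L R P).get? v =
      if L ≤ v ∧ v ≤ R then (lastIdx P v).map (fun i => (i : Int)) else none := by
  induction P using List.reverseRecOn with
  | nil => simp [lpF, lastIdx, PySem.Dict.get?_empty]
  | append_singleton P x ih =>
    rw [lpF_snoc, lastIdx_snoc]
    by_cases hx : L ≤ x ∧ x ≤ R
    · rw [if_pos hx, PySem.Dict.get?_insert]
      by_cases hv : v = x
      · subst hv; simp [hx]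
      · rw [if_neg hv, ih]
        by_cases hr : L ≤ v ∧ v ≤ R
        · rw [if_neg (fun h : x = v => hv h.symm)]
        · simp [hr]
    · simp only [hx, if_false]
      rw [ih]
      by_cases hv : x = v
      · subst hv; simp [hx]
      · simp [hv]

theorem lpF_keys (L R : Int) (P : List Int) : (lpF L R P).keys = dsetL L R P := by
  induction P using List.reverseRecOn with
  | nil => simp [lpF, dsetL, PySem.Dict.keys]; rfl
  | append_singleton P x ih =>
    rw [lpF_snoc, dsetL_snoc]
    by_cases hx : L ≤ x ∧ x ≤ R
    · rw [if_pos hx, if_pos hx]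
      by_cases hc : (lpF L R P).contains x
      · rw [PySem.Dict.keys_insert_of_contains _ _ hc]
        rw [PySem.Set.add, if_pos]
        · exact ih
        · rw [PySem.Dict.contains_iff_mem_keys, ih] at hc
          simpa [PySem.Set.contains] using hc
      · rw [PySem.Dict.keys_insert_of_not_contains _ _ (by simpa using hc)]
        rw [PySem.Set.add, if_neg, ih]
        rw [PySem.Dict.contains_iff_mem_keys, ih] at hc
        simpa [PySem.Set.contains] using hc
    · simp [hx, ih]

theorem nodup_lpF_keys (L R : Int) (P : List Int) : (lpF L R P).keys.Nodup := by
  induction P using List.reverseRecOn with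
  | nil => exact PySem.Dict.nodup_keys_empty
  | append_singleton P x ih =>
    rw [lpF_snoc]
    by_cases hx : L ≤ x ∧ x ≤ R
    · simpa [hx] using PySem.Dict.nodup_keys_insert _ _ _ ih
    · simpa [hx] using ih

theorem min?_id_eq_of (xs : List Int) (m : Int) (h1 : m ∈ xs) (h2 : ∀ y ∈ xs, m ≤ y) :
    PySem.List.min? xs (fun x => x) = some m := by
  cases hm : PySem.List.min? xs (fun x => x) with
  | none => rw [PySem.List.min?_eq_none_iff] at hm; simp [hm] at h1
  | some m' =>
    have h3 := PySem.List.min?_mem hm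
    have h4 := PySem.List.min?_isMin hm
    have := h2 m' h3
    have := h4 m h1
    simp at *
    omega

theorem length_eq_of_nodup_of_mem_iff (l₁ l₂ : List Int) (h1 : l₁.Nodup) (h2 : l₂.Nodup)
    (h : ∀ a, a ∈ l₁ ↔ a ∈ l₂) : l₁.length = l₂.length :=
  (List.perm_of_nodup_nodup_toFinset_eq h1 h2 (by ext a; simp [h a])).length_eq

theorem mem_values_lpF (L R : Int) (P : List Int) (y : Int) :
    y ∈ (lpF L R P).values ↔
      ∃ v i, (L ≤ v ∧ v ≤ R) ∧ lastIdx P v = some i ∧ y = (i : Int) := by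
  rw [PySem.Dict.values_eq_map_keys _ (nodup_lpF_keys L R P) 0]
  constructor
  · intro hy
    simp only [List.mem_map] at hy
    obtain ⟨k, hk, hval⟩ := hy
    rw [lpF_keys, mem_dsetL] at hk
    obtain ⟨i, hi⟩ := Option.isSome_iff_exists.mp ((lastIdx_isSome_iff P k).mpr hk.2)
    refine ⟨k, i, hk.1, hi, ?_⟩
    rw [← hval, PySem.Dict.getD_of_get?_eq_some]
    rw [lpF_get?, if_pos hk.1, hi]; rfl
  · rintro ⟨v, i, hreq, hlast, rfl⟩
    simp only [List.mem_map]
    refine ⟨v, ?_, ?_⟩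
    · rw [lpF_keys, mem_dsetL]
      exact ⟨hreq, (lastIdx_isSome_iff P v).mp (by simp [hlast])⟩
    · rw [PySem.Dict.getD_of_get?_eq_some]
      rw [lpF_get?, if_pos hreq, hlast]; rfl

theorem lastIdx_inj (P : List Int) (v w : Int) (i : Nat)
    (hv : lastIdx P v = some i) (hw : lastIdx P w = some i) : v = w := by
  have h1 := lastIdx_getD P v i hv
  have h2 := lastIdx_getD P w i hw
  rw [← h1, ← h2]

-- the min of the last-position values: witness and lower-bound facts
theorem min_lpF_spec (L R : Int) (P : List Int) (mI : Int)
    (h : PySem.List.min? (lpF L R P).values (fun x => x) = some mI) :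
    ∃ (mN : Nat) (v0 : Int), mI = (mN : Int) ∧ (L ≤ v0 ∧ v0 ≤ R) ∧ lastIdx P v0 = some mN ∧
      (∀ v i, (L ≤ v ∧ v ≤ R) → lastIdx P v = some i → mN ≤ i) := by
  have hmem := PySem.List.min?_mem h
  have hmin := PySem.List.min?_isMin h
  rw [mem_values_lpF] at hmem
  obtain ⟨v0, mN, hreq, hlast, rfl⟩ := hmem
  refine ⟨mN, v0, rfl, hreq, hlast, ?_⟩
  intro v i hr hl
  have : (mN : Int) ≤ (i : Int) := by
    have := hmin (i : Int) (by rw [mem_values_lpF]; exact ⟨v, i, hr, hl, rfl⟩)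
    simpa using this
  exact_mod_cast this

-- all required values survive dropping up to the minimal last position

theorem dsetL_drop_min_succ (L R : Int) (P : List Int) (mN : Nat) (v0 : Int)
    (hreq : L ≤ v0 ∧ v0 ≤ R) (hlast : lastIdx P v0 = some mN)
    (hmin : ∀ v i, (L ≤ v ∧ v ≤ R) → lastIdx P v = some i → mN ≤ i) :
    (dsetL L R (P.drop (mN + 1))).length + 1 = (dsetL L R P).length := by
  have hv0P : v0 ∈ P := (lastIdx_isSome_iff P v0).mp (by simp [hlast])
  have hv0 : v0 ∈ dsetL L R P := (mem_dsetL L R P v0).mpr ⟨hreq, hv0P⟩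
  have hlen : (dsetL L R (P.drop (mN + 1))).length = ((dsetL L R P).erase v0).length := by
    apply length_eq_of_nodup_of_mem_iff _ _ (nodup_dsetL _ _ _)
      ((nodup_dsetL L R P).erase v0)
    intro v
    rw [(nodup_dsetL L R P).mem_erase_iff, mem_dsetL, mem_dsetL, mem_drop_iff_lastIdx]
    constructor
    · rintro ⟨hr, i, hi, hmi⟩
      refine ⟨?_, hr, (lastIdx_isSome_iff P v).mp (by simp [hi])⟩
      intro hvv0
      subst hvv0
      rw [hi] at hlast
      have := Option.some.inj hlast
      omega
    · rintro ⟨hne, hr, hv⟩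
      obtain ⟨i, hi⟩ := Option.isSome_iff_exists.mp ((lastIdx_isSome_iff P v).mpr hv)
      have hge := hmin v i hr hi
      have : i ≠ mN := fun hEq => hne (lastIdx_inj P v v0 mN (hEq ▸ hi) hlast)
      exact ⟨hr, i, hi, by omega⟩
  rw [hlen, List.length_erase_of_mem hv0]
  have : 0 < (dsetL L R P).length := List.length_pos_of_mem hv0
  omega

theorem pyMinOpt_absorb (ml : Option Int) (a b : Int) (h : b ≤ a) :
    pyMinOpt (pyMinOpt ml a) b = pyMinOpt ml b := by
  cases ml with
  | none => simp [pyMinOpt]; omega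
  | some c => simp [pyMinOpt]; omega

theorem pyMinOpt_eq_of_le (ml : Option Int) (μ a : Int) (hml : ml = some μ) (h : μ ≤ a) :
    pyMinOpt ml a = ml := by
  subst hml; simp [pyMinOpt]; omega

-- running A's shrink loop from inside a covering window: it stops one past the
-- minimal last position, having recorded exactly the window anchored there
theorem shrink_run (A : List Int) (L R : Int) (r : Nat) (hr : r < A.length)
    (mN : Nat) (v0 : Int)
    (hreq0 : L ≤ v0 ∧ v0 ≤ R) (hlast0 : lastIdx (A.take (r+1)) v0 = some mN)
    (hminP : ∀ v i, (L ≤ v ∧ v ≤ R) → lastIdx (A.take (r+1)) v = some i → mN ≤ i) :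
    ∀ fuel left, mN + 1 - left ≤ fuel → left ≤ mN →
    ∀ (wc : PySem.Dict Int Int) (ml : Option Int),
    (∀ v, L ≤ v ∧ v ≤ R → wc.getD v 0 = ((((A.take (r+1)).drop left).count v : Nat) : Int)) →
    ∃ wc', solutionShrink A L R (R - L + 1) r wc (R - L + 1) ml left =
        (wc', R - L, pyMinOpt ml ((r : Int) - (mN : Int) + 1), mN + 1) ∧
      (∀ v, L ≤ v ∧ v ≤ R → wc'.getD v 0 = ((((A.take (r+1)).drop (mN+1)).count v : Nat) : Int)) := by
  set P := A.take (r+1) with hP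
  have hPlen : P.length = r + 1 := by
    rw [hP, List.length_take]; omega
  have hmNlt : mN < r + 1 := by
    have := lastIdx_lt P v0 mN hlast0; omega
  intro fuel
  induction fuel with
  | zero => intro left h1 h2; omega
  | succ fuel ih =>
    intro left hfuel hleft wc ml hwc
    have hlA : left < A.length := by omega
    have hlP : left < P.length := by omega
    have hPA : P[left] = A[left] := List.getElem_take
    have hdropc : P.drop left = A[left] :: P.drop (left + 1) := by
      rw [List.drop_eq_getElem_cons hlP, hPA]
    rw [solutionShrink, if_pos rfl, dif_pos hlA]
    simp only []
    by_cases hreql : L ≤ A[left] ∧ A[left] ≤ R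
    · rw [if_pos hreql]
      -- A[left] is a required value; it still occurs later in the window iff left < mN
      have hlvP : A[left] ∈ P := by rw [← hPA]; exact List.getElem_mem hlP
      obtain ⟨i, hi⟩ := Option.isSome_iff_exists.mp ((lastIdx_isSome_iff P A[left]).mpr hlvP)
      have himN : mN ≤ i := hminP _ _ hreql hi
      have hcnt : wc.getD A[left] 0 = (((P.drop left).count A[left] : Nat) : Int) :=
        hwc _ hreql
      rw [hdropc, List.count_cons_self] at hcnt
      rcases Nat.lt_or_ge left mN with hcase | hcase
      · -- left < mN : the popped value still occurs later, coverage survives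
        have hmem : A[left] ∈ P.drop (left + 1) := by
          rw [mem_drop_iff_lastIdx]; exact ⟨i, hi, by omega⟩
        have hpos : 0 < (P.drop (left + 1)).count A[left] := List.count_pos_iff.mpr hmem
        have hval : wc.getD A[left] 0 - 1 = (((P.drop (left+1)).count A[left] : Nat) : Int) := by
          rw [hcnt]; push_cast; ring
        have hne0 : ¬ ((wc.insert A[left] (wc.getD A[left] 0 - 1)).getD A[left] 0 = 0) := by
          rw [PySem.Dict.getD_insert_self, hval]
          omega
        rw [if_neg hne0]
        have hwc' : ∀ v, L ≤ v ∧ v ≤ R →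
            (wc.insert A[left] (wc.getD A[left] 0 - 1)).getD v 0
              = (((P.drop (left+1)).count v : Nat) : Int) := by
          intro v hv
          by_cases hvv : v = A[left]
          · subst hvv; rw [PySem.Dict.getD_insert_self, hval]
          · rw [PySem.Dict.getD_insert_of_ne _ _ _ hvv, hwc v hv, hdropc,
              List.count_cons_of_ne (Ne.symm hvv)]
        obtain ⟨wc', heq, hwc''⟩ := ih (left + 1) (by omega) (by omega)
          (wc.insert A[left] (wc.getD A[left] 0 - 1))
          (pyMinOpt ml ((r : Int) - (left : Int) + 1)) hwc'
        refine ⟨wc', ?_, hwc''⟩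
        rw [heq, pyMinOpt_absorb]
        have : (left : Int) ≤ (mN : Int) := by exact_mod_cast Nat.le_of_lt hcase
        omega
      · -- left = mN : popping A[left] = v0 empties its count, coverage breaks
        have hleftmN : left = mN := by omega
        subst hleftmN
        have hv0 : A[left] = v0 := by
          have h1 : P.getD left 0 = v0 := lastIdx_getD P v0 left hlast0
          rw [List.getD_eq_getElem _ _ hlP] at h1
          rw [← hPA]; exact h1
        have hnot : A[left] ∉ P.drop (left + 1) := by
          rw [mem_drop_iff_lastIdx, hv0]
          rintro ⟨j, hj, hjge⟩
          rw [hlast0] at hj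
          have := Option.some.inj hj
          omega
        have hzero : (P.drop (left + 1)).count A[left] = 0 :=
          List.count_eq_zero.mpr hnot
        have hval : wc.getD A[left] 0 - 1 = 0 := by
          rw [hcnt, hzero]; norm_num
        have heq0 : (wc.insert A[left] (wc.getD A[left] 0 - 1)).getD A[left] 0 = 0 := by
          rw [PySem.Dict.getD_insert_self, hval]
        rw [if_pos heq0]
        have hstop : ¬ (R - L + 1 - 1 = R - L + 1) := by omega
        rw [solutionShrink, if_neg hstop]
        have harith : R - L + 1 - 1 = R - L := by ring
        refine ⟨wc.insert A[left] (wc.getD A[left] 0 - 1), by rw [harith], ?_⟩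
        intro v hv
        by_cases hvv : v = A[left]
        · subst hvv
          rw [heq0, hzero]; rfl
        · rw [PySem.Dict.getD_insert_of_ne _ _ _ hvv, hwc v hv, hdropc,
            List.count_cons_of_ne (Ne.symm hvv)]
    · rw [if_neg hreql]
      -- a noise value: nothing tracked changes
      have hlvP : A[left] ∈ P := by rw [← hPA]; exact List.getElem_mem hlP
      have hcase : left < mN := by
        rcases Nat.lt_or_ge left mN with h | h
        · exact h
        · exfalso
          have hleftmN : left = mN := by omega
          subst hleftmN
          have h1 : P.getD left 0 = v0 := lastIdx_getD P v0 left hlast0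
          rw [List.getD_eq_getElem _ _ hlP] at h1
          rw [← hPA, h1] at hreql
          exact hreql hreq0
      have hwc' : ∀ v, L ≤ v ∧ v ≤ R →
          wc.getD v 0 = (((P.drop (left+1)).count v : Nat) : Int) := by
        intro v hv
        have hvv : v ≠ A[left] := fun h => hreql (h ▸ hv)
        rw [hwc v hv, hdropc, List.count_cons_of_ne (Ne.symm hvv)]
      obtain ⟨wc', heq, hwc''⟩ := ih (left + 1) (by omega) (by omega) wc
        (pyMinOpt ml ((r : Int) - (left : Int) + 1)) hwc'
      refine ⟨wc', ?_, hwc''⟩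
      rw [heq, pyMinOpt_absorb]
      have : (left : Int) ≤ (mN : Int) := by exact_mod_cast Nat.le_of_lt hcase
      omega

theorem shrink_noop (A : List Int) (L R need : Int) (r : Nat) (wc : PySem.Dict Int Int)
    (hv : Int) (ml : Option Int) (left : Nat) (h : hv ≠ need) :
    solutionShrink A L R need r wc hv ml left = (wc, hv, ml, left) := by
  rw [solutionShrink, if_neg h]

theorem pyMinOpt_le (ml : Option Int) (a : Int) :
    ∃ μ, pyMinOpt ml a = some μ ∧ μ ≤ a := by
  cases ml with
  | none => exact ⟨a, rfl, le_refl a⟩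
  | some c => exact ⟨min c a, rfl, min_le_right c a⟩

theorem set_add_of_mem (s : PySem.Set Int) (x : Int) (h : x ∈ s) :
    PySem.Set.add s x = s := by
  simp [PySem.Set.add, PySem.Set.contains, h]

theorem set_add_of_not_mem (s : PySem.Set Int) (x : Int) (h : x ∉ s) :
    PySem.Set.add s x = s ++ [x] := by
  simp [PySem.Set.add, PySem.Set.contains, h]

-- pigeonhole: R-L+1 distinct values inside [L,R] are all of [L,R]
theorem mem_dsetL_of_full (L R : Int) (P : List Int) (x : Int)
    (hfull : ((dsetL L R P).length : Int) = R - L + 1) (hx : L ≤ x ∧ x ≤ R) :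
    x ∈ dsetL L R P := by
  have hnd := nodup_dsetL L R P
  have hsub : (dsetL L R P).toFinset ⊆ Finset.Icc L R := by
    intro v hv
    rw [List.mem_toFinset, mem_dsetL] at hv
    rw [Finset.mem_Icc]
    exact hv.1
  have hcard1 : (dsetL L R P).toFinset.card = (dsetL L R P).length :=
    List.toFinset_card_of_nodup hnd
  have hcard2 : (Finset.Icc L R).card = (R + 1 - L).toNat := Int.card_Icc L R
  have heq : (dsetL L R P).toFinset = Finset.Icc L R := by
    apply Finset.eq_of_subset_of_card_le hsub
    rw [hcard1, hcard2]
    omega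
  have : x ∈ (dsetL L R P).toFinset := by
    rw [heq, Finset.mem_Icc]; exact hx
  rwa [List.mem_toFinset] at this

theorem lpF_size (L R : Int) (P : List Int) :
    (lpF L R P).size = (dsetL L R P).length := by
  have h1 : (lpF L R P).size = (lpF L R P).keys.length := by
    simp [PySem.Dict.size, PySem.Dict.keys]
  rw [h1, lpF_keys]

def stepA (A : List Int) (L R need : Int) (st : PySem.Dict Int Int × Int × Option Int × Nat)
    (r : Nat) : PySem.Dict Int Int × Int × Option Int × Nat :=
  let wc := st.1; let hv := st.2.1; let ml := st.2.2.1; let left := st.2.2.2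
  let rv := A.getD r 0
  let st2 :=
    if L ≤ rv ∧ rv ≤ R then
      let wc' := wc.insert rv (wc.getD rv 0 + 1)
      (wc', if wc'.getD rv 0 = 1 then hv + 1 else hv)
    else (wc, hv)
  solutionShrink A L R need r st2.1 st2.2 ml left

def stepB (A : List Int) (L R need : Int) (st : PySem.Dict Int Int × Option Int) (r : Nat) :
    PySem.Dict Int Int × Option Int :=
  let lp := st.1; let ml := st.2
  let v := A.getD r 0
  let lp' := if L ≤ v ∧ v ≤ R then lp.insert v (r : Int) else lp
  let ml' :=
    if (lp'.size : Int) = need then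
      match PySem.List.min? lp'.values (fun x => x) with
      | some m => pyMinOpt ml ((r : Int) - m + 1)
      | none => ml
    else ml
  (lp', ml')

def foldA (A : List Int) (L R : Int) (p : Nat) : PySem.Dict Int Int × Int × Option Int × Nat :=
  (List.range p).foldl (stepA A L R (R - L + 1)) (PySem.Dict.empty, 0, none, 0)

def foldB (A : List Int) (L R : Int) (p : Nat) : PySem.Dict Int Int × Option Int :=
  (List.range p).foldl (stepB A L R (R - L + 1)) (PySem.Dict.empty, none)

-- A and B are each a fold of their step over the indices; the invariant couples them
theorem solution_eq_foldA (A : List Int) (L R : Int) :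
    solution A L R = (match (foldA A L R A.length).2.2.1 with | some m => m | none => -1) := rfl

theorem solution_alt_eq_foldB (A : List Int) (L R : Int) :
    solution_alt A L R = (match (foldB A L R A.length).2 with | some m => m | none => -1) := rfl

theorem foldA_succ (A : List Int) (L R : Int) (p : Nat) :
    foldA A L R (p + 1) = stepA A L R (R - L + 1) (foldA A L R p) p := by
  rw [foldA, foldA, List.range_succ, List.foldl_append, List.foldl_cons, List.foldl_nil]

theorem foldB_succ (A : List Int) (L R : Int) (p : Nat) :
    foldB A L R (p + 1) = stepB A L R (R - L + 1) (foldB A L R p) p := by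
  rw [foldB, foldB, List.range_succ, List.foldl_append, List.foldl_cons, List.foldl_nil]

def InvP (A : List Int) (L R : Int) (p : Nat) : Prop :=
  (foldB A L R p).1 = lpF L R (A.take p) ∧
  (foldA A L R p).2.2.1 = (foldB A L R p).2 ∧
  (∀ v, L ≤ v ∧ v ≤ R →
    (foldA A L R p).1.getD v 0 = ((((A.take p).drop (foldA A L R p).2.2.2).count v : Nat) : Int)) ∧
  (foldA A L R p).2.1 = (((dsetL L R ((A.take p).drop (foldA A L R p).2.2.2)).length : Nat) : Int) ∧
  (if ((dsetL L R (A.take p)).length : Int) = R - L + 1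
    then ∃ mN : Nat,
      PySem.List.min? (lpF L R (A.take p)).values (fun x => x) = some ((mN : Nat) : Int) ∧
      (foldA A L R p).2.2.2 = mN + 1 ∧
      ∃ μ : Int, (foldB A L R p).2 = some μ ∧ μ ≤ (p : Int) - (mN : Int)
    else (foldA A L R p).2.2.2 = 0)

theorem InvP_zero (A : List Int) (L R : Int) (hneed : R - L + 1 ≠ 0) : InvP A L R 0 := by
  refine ⟨rfl, rfl, ?_, ?_, ?_⟩
  · intro v hv
    simp [foldA, PySem.Dict.getD_empty]
  · simp [foldA, dsetL]
  · rw [if_neg]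
    · rfl
    · simp [dsetL]
      intro h
      rw [← h] at hneed
      simp at hneed

theorem count_snoc_self (W : List Int) (x : Int) : (W ++ [x]).count x = W.count x + 1 := by
  simp

theorem count_snoc_ne (W : List Int) (x v : Int) (h : v ≠ x) :
    (W ++ [x]).count v = W.count v := by
  simp [List.count_append, List.count_singleton]
  exact fun hh => h hh.symm

theorem InvP_step (A : List Int) (L R : Int) (p : Nat)
    (hp : p < A.length) (ih : InvP A L R p) : InvP A L R (p + 1) := by
  obtain ⟨h1, h2, h3, h4, h5⟩ := ih
  have hPl : (A.take p).length = p := by rw [List.length_take]; omega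
  have hPs : A.take (p + 1) = A.take p ++ [A[p]] := List.take_succ_eq_append_getElem hp
  have hgetD : A.getD p 0 = A[p] := List.getD_eq_getElem A 0 hp
  -- the B dict after the step is the last-position dict of the longer prefix
  have hlp' : (if L ≤ A[p] ∧ A[p] ≤ R then (foldB A L R p).1.insert A[p] (p : Int)
      else (foldB A L R p).1) = lpF L R (A.take (p + 1)) := by
    rw [h1, hPs, lpF_snoc, hPl]
  have hB1 : (foldB A L R (p + 1)).1 = lpF L R (A.take (p + 1)) := by
    rw [foldB_succ]; simp only [stepB]; rw [hgetD, hlp']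
  have hB2 : (foldB A L R (p + 1)).2 =
      (if ((dsetL L R (A.take (p + 1))).length : Int) = R - L + 1 then
        (match PySem.List.min? (lpF L R (A.take (p + 1))).values (fun x => x) with
          | some m => pyMinOpt (foldB A L R p).2 ((p : Int) - m + 1)
          | none => (foldB A L R p).2)
        else (foldB A L R p).2) := by
    rw [foldB_succ]; simp only [stepB]; rw [hgetD, hlp', lpF_size]
  by_cases hf : ((dsetL L R (A.take p)).length : Int) = R - L + 1
  · -- the shorter prefix already covers [L, R]
    rw [if_pos hf] at h5
    obtain ⟨mN, hmin, hlft, μ, hμeq, hμle⟩ := h5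
    obtain ⟨mN2, v0, hc, hreq0, hlast0, hminP⟩ := min_lpF_spec L R (A.take p) _ hmin
    have hmm : mN = mN2 := by exact_mod_cast hc
    subst hmm
    have hmNp : mN < p := by have := lastIdx_lt _ _ _ hlast0; omega
    have hdm := dsetL_drop_min_succ L R (A.take p) mN v0 hreq0 hlast0 hminP
    have hhv : (foldA A L R p).2.1 = R - L := by
      rw [h4, hlft]
      have h6 : ((dsetL L R ((A.take p).drop (mN + 1))).length : Int) + 1
          = ((dsetL L R (A.take p)).length : Int) := by exact_mod_cast hdm
      omega
    have hWs : (A.take (p + 1)).drop (mN + 1) = (A.take p).drop (mN + 1) ++ [A[p]] := by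
      rw [hPs, List.drop_append_of_le_length (by omega)]
    by_cases hreqx : L ≤ A[p] ∧ A[p] ≤ R
    · -- required new element
      have hxP : A[p] ∈ dsetL L R (A.take p) := mem_dsetL_of_full L R _ _ hf hreqx
      have hdP' : dsetL L R (A.take (p + 1)) = dsetL L R (A.take p) := by
        rw [hPs, dsetL_snoc, if_pos hreqx, set_add_of_mem _ _ hxP]
      have hf' : ((dsetL L R (A.take (p + 1))).length : Int) = R - L + 1 := by
        rw [hdP']; exact hf
      have hcnt : (foldA A L R p).1.getD A[p] 0
          = ((((A.take p).drop (foldA A L R p).2.2.2).count A[p] : Nat) : Int) :=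
        h3 _ hreqx
      by_cases hhit : 0 < ((A.take p).drop (mN + 1)).count A[p]
      · -- A[p] still occurs in the current window: coverage unchanged, no shrink
        obtain ⟨i, hi, hile⟩ := (mem_drop_iff_lastIdx (A.take p) A[p] (mN + 1)).mp
          (List.count_pos_iff.mp hhit)
        have hxv0 : A[p] ≠ v0 := by
          intro hEq
          rw [hEq, hlast0] at hi
          have := Option.some.inj hi
          omega
        have hmin' : PySem.List.min? (lpF L R (A.take (p + 1))).values (fun x => x)
            = some ((mN : Nat) : Int) := by
          apply min?_id_eq_of
          · rw [mem_values_lpF]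
            refine ⟨v0, mN, hreq0, ?_, rfl⟩
            rw [hPs, lastIdx_snoc, if_neg hxv0]
            exact hlast0
          · intro y hy
            rw [mem_values_lpF] at hy
            obtain ⟨v, i', hrv, hl', rfl⟩ := hy
            rw [hPs, lastIdx_snoc] at hl'
            by_cases hvx : A[p] = v
            · rw [if_pos hvx] at hl'
              have hieq : i' = (A.take p).length := (Option.some.inj hl').symm
              have : mN ≤ i' := by omega
              exact_mod_cast this
            · rw [if_neg hvx] at hl'
              have := hminP v i' hrv hl'
              exact_mod_cast this
        have hifeq : (if ((foldA A L R p).1.insert A[p]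
            ((foldA A L R p).1.getD A[p] 0 + 1)).getD A[p] 0 = 1
              then (foldA A L R p).2.1 + 1 else (foldA A L R p).2.1) = (foldA A L R p).2.1 := by
          rw [PySem.Dict.getD_insert_self, hcnt, hlft]
          have : ¬ ((((A.take p).drop (mN + 1)).count A[p] : Int) + 1 = 1) := by
            have : 0 < (((A.take p).drop (mN + 1)).count A[p] : Int) := by exact_mod_cast hhit
            omega
          rw [if_neg this]
        have hnoshrink : (foldA A L R p).2.1 ≠ R - L + 1 := by
          rw [hhv]; omega
        have hA : foldA A L R (p + 1) =
            ((foldA A L R p).1.insert A[p] ((foldA A L R p).1.getD A[p] 0 + 1),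
              (foldA A L R p).2.1, (foldA A L R p).2.2.1, (foldA A L R p).2.2.2) := by
          rw [foldA_succ]; simp only [stepA]; rw [hgetD, if_pos hreqx]
          simp only
          rw [hifeq]
          exact shrink_noop _ _ _ _ _ _ _ _ _ hnoshrink
        have hBml : (foldB A L R (p + 1)).2 = (foldB A L R p).2 := by
          rw [hB2, if_pos hf', hmin']
          exact pyMinOpt_eq_of_le _ μ _ hμeq (by omega)
        refine ⟨hB1, ?_, ?_, ?_, ?_⟩
        · rw [hA, hBml]; exact h2
        · intro v hv
          rw [hA]
          simp only
          rw [hlft] at hcnt ⊢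
          rw [hPs, List.drop_append_of_le_length (by omega)]
          by_cases hvx : v = A[p]
          · subst hvx
            rw [PySem.Dict.getD_insert_self, hcnt, count_snoc_self]
            push_cast; ring
          · rw [PySem.Dict.getD_insert_of_ne _ _ _ hvx, h3 v hv, hlft,
              count_snoc_ne _ _ _ hvx]
        · rw [hA]
          simp only
          rw [hlft, hWs, dsetL_snoc, if_pos hreqx, set_add_of_mem, h4, hlft]
          rw [mem_dsetL]
          exact ⟨hreqx, List.count_pos_iff.mp hhit⟩
        · rw [if_pos hf']
          refine ⟨mN, hmin', ?_, μ, ?_, ?_⟩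
          · rw [hA]; simp only; exact hlft
          · rw [hBml]; exact hμeq
          · push_cast; omega
      · -- A[p] was NOT in the window: it must be the minimal value v0; re-cover and shrink
        have hcnt0 : ((A.take p).drop (mN + 1)).count A[p] = 0 := by omega
        have hxnotW : A[p] ∉ (A.take p).drop (mN + 1) := by
          rw [← List.count_eq_zero] at *; exact hcnt0
        have hxmemP : A[p] ∈ A.take p := ((mem_dsetL L R _ _).mp hxP).2
        obtain ⟨i, hi⟩ := Option.isSome_iff_exists.mp ((lastIdx_isSome_iff _ _).mpr hxmemP)
        have hile : ¬ (mN + 1 ≤ i) := by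
          intro hle
          exact hxnotW ((mem_drop_iff_lastIdx _ _ _).mpr ⟨i, hi, hle⟩)
        have himN : i = mN := by have := hminP _ _ hreqx hi; omega
        have hxv0 : A[p] = v0 := lastIdx_inj _ _ _ mN (himN ▸ hi) hlast0
        -- the new minimum of last positions
        have hne : (lpF L R (A.take (p+1))).values ≠ [] := by
          intro hemp
          have : ((p : Nat) : Int) ∈ (lpF L R (A.take (p+1))).values := by
            rw [mem_values_lpF]
            refine ⟨A[p], p, hreqx, ?_, rfl⟩
            rw [hPs, lastIdx_snoc, if_pos rfl, hPl]
          rw [hemp] at this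
          simp at this
        obtain ⟨mI', hmin'⟩ : ∃ mI',
            PySem.List.min? (lpF L R (A.take (p+1))).values (fun x => x) = some mI' := by
          cases hm : PySem.List.min? (lpF L R (A.take (p+1))).values (fun x => x) with
          | none => exact absurd ((PySem.List.min?_eq_none_iff _ _).mp hm) hne
          | some m => exact ⟨m, rfl⟩
        obtain ⟨mN', v0', hc', hreq0', hlast0', hminP'⟩ :=
          min_lpF_spec L R (A.take (p+1)) _ hmin'
        subst hc'
        have hmN'ge : mN + 1 ≤ mN' := by
          rw [hPs, lastIdx_snoc] at hlast0'
          by_cases hvx : A[p] = v0'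
          · rw [if_pos hvx] at hlast0'
            have : (A.take p).length = mN' := Option.some.inj hlast0'
            omega
          · rw [if_neg hvx] at hlast0'
            have h7 := hminP _ _ hreq0' hlast0'
            have h8 : mN' ≠ mN := by
              intro hEq
              exact hvx (hxv0 ▸ (lastIdx_inj _ _ _ mN (hEq ▸ hlast0') hlast0).symm)
            omega
        -- counts of the expanded window
        have hwcpre : ∀ v, L ≤ v ∧ v ≤ R →
            ((foldA A L R p).1.insert A[p] ((foldA A L R p).1.getD A[p] 0 + 1)).getD v 0
              = ((((A.take (p+1)).drop (mN + 1)).count v : Nat) : Int) := by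
          intro v hv
          rw [hWs]
          by_cases hvx : v = A[p]
          · subst hvx
            rw [PySem.Dict.getD_insert_self, hcnt, hlft, count_snoc_self, hcnt0]
            norm_num
          · rw [PySem.Dict.getD_insert_of_ne _ _ _ hvx, h3 v hv, hlft,
              count_snoc_ne _ _ _ hvx]
        obtain ⟨wc', hshr, hwc'⟩ := shrink_run A L R p hp mN' v0' hreq0' hlast0' hminP'
          (mN' + 1) (mN + 1) (by omega) (by omega)
          ((foldA A L R p).1.insert A[p] ((foldA A L R p).1.getD A[p] 0 + 1))
          (foldA A L R p).2.2.1 hwcpre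
        have hA : foldA A L R (p + 1) =
            (wc', R - L, pyMinOpt (foldA A L R p).2.2.1 ((p : Int) - (mN' : Int) + 1),
              mN' + 1) := by
          rw [foldA_succ]; simp only [stepA]; rw [hgetD, if_pos hreqx]
          have hone : ((foldA A L R p).1.insert A[p]
              ((foldA A L R p).1.getD A[p] 0 + 1)).getD A[p] 0 = 1 := by
            rw [PySem.Dict.getD_insert_self, hcnt, hlft, hcnt0]
            norm_num
          rw [hone, if_pos rfl, hhv]
          have : R - L + 1 = R - L + 1 := rfl
          rw [hlft]
          exact hshr
        have hdP' : dsetL L R (A.take (p + 1)) = dsetL L R (A.take p) := by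
          rw [hPs, dsetL_snoc, if_pos hreqx, set_add_of_mem _ _ hxP]
        have hf' : ((dsetL L R (A.take (p + 1))).length : Int) = R - L + 1 := by
          rw [hdP']; exact hf
        have hdm' := dsetL_drop_min_succ L R (A.take (p+1)) mN' v0' hreq0' hlast0' hminP'
        have hBml : (foldB A L R (p + 1)).2
            = pyMinOpt (foldB A L R p).2 ((p : Int) - (mN' : Int) + 1) := by
          rw [hB2, if_pos hf', hmin']
        refine ⟨hB1, ?_, ?_, ?_, ?_⟩
        · rw [hA, hBml, h2]
        · intro v hv
          rw [hA]
          simp only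
          exact hwc' v hv
        · rw [hA]
          simp only
          have h6 : ((dsetL L R ((A.take (p+1)).drop (mN' + 1))).length : Int) + 1
              = ((dsetL L R (A.take (p+1))).length : Int) := by exact_mod_cast hdm'
          omega
        · rw [if_pos hf']
          obtain ⟨μ', hμ'eq, hμ'le⟩ := pyMinOpt_le (foldA A L R p).2.2.1 ((p : Int) - (mN' : Int) + 1)
          refine ⟨mN', hmin', by rw [hA], μ', ?_, by push_cast; omega⟩
          rw [hBml, ← h2, hμ'eq]
    · -- noise element: nothing changes on either side
      have hdP' : dsetL L R (A.take (p + 1)) = dsetL L R (A.take p) := by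
        rw [hPs, dsetL_snoc, if_neg hreqx]
      have hf' : ((dsetL L R (A.take (p + 1))).length : Int) = R - L + 1 := by
        rw [hdP']; exact hf
      have hlpeq : lpF L R (A.take (p + 1)) = lpF L R (A.take p) := by
        rw [hPs, lpF_snoc, if_neg hreqx]
      have hA : foldA A L R (p + 1) = foldA A L R p := by
        rw [foldA_succ]; simp only [stepA]; rw [hgetD, if_neg hreqx]
        have : (foldA A L R p).2.1 ≠ R - L + 1 := by rw [hhv]; omega
        rw [shrink_noop _ _ _ _ _ _ _ _ _ this]
      have hBml : (foldB A L R (p + 1)).2 = (foldB A L R p).2 := by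
        rw [hB2, if_pos hf', hlpeq, hmin]
        exact pyMinOpt_eq_of_le _ μ _ hμeq (by omega)
      refine ⟨hB1, ?_, ?_, ?_, ?_⟩
      · rw [hA, hBml]; exact h2
      · intro v hv
        rw [hA, h3 v hv, hlft, hWs]
        have hvx : v ≠ A[p] := fun h => hreqx (h ▸ hv)
        rw [count_snoc_ne _ _ _ hvx]
      · rw [hA, h4, hlft, hWs, dsetL_snoc, if_neg hreqx]
      · rw [if_pos hf']
        refine ⟨mN, by rw [hlpeq]; exact hmin, by rw [hA]; exact hlft, μ, ?_, by push_cast; omega⟩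
        rw [hBml]; exact hμeq
  · -- the shorter prefix does not yet cover [L, R]; left pointer is 0
    rw [if_neg hf] at h5
    have hW0 : (A.take p).drop (foldA A L R p).2.2.2 = A.take p := by rw [h5]; rfl
    have hhv : (foldA A L R p).2.1 = ((dsetL L R (A.take p)).length : Int) := by
      rw [h4, hW0]
    by_cases hreqx : L ≤ A[p] ∧ A[p] ≤ R
    · have hcnt : (foldA A L R p).1.getD A[p] 0
          = (((A.take p).count A[p] : Nat) : Int) := by
        rw [h3 _ hreqx, hW0]
      by_cases hhit : 0 < (A.take p).count A[p]
      · -- A[p] already occurs in the prefix: distinct count unchanged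
        have hxP : A[p] ∈ dsetL L R (A.take p) :=
          (mem_dsetL _ _ _ _).mpr ⟨hreqx, List.count_pos_iff.mp hhit⟩
        have hdP' : dsetL L R (A.take (p + 1)) = dsetL L R (A.take p) := by
          rw [hPs, dsetL_snoc, if_pos hreqx, set_add_of_mem _ _ hxP]
        have hnf' : ¬ (((dsetL L R (A.take (p + 1))).length : Int) = R - L + 1) := by
          rw [hdP']; exact hf
        have hifeq : (if ((foldA A L R p).1.insert A[p]
            ((foldA A L R p).1.getD A[p] 0 + 1)).getD A[p] 0 = 1
              then (foldA A L R p).2.1 + 1 else (foldA A L R p).2.1) = (foldA A L R p).2.1 := by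
          rw [PySem.Dict.getD_insert_self, hcnt]
          have : ¬ (((A.take p).count A[p] : Int) + 1 = 1) := by
            have : 0 < ((A.take p).count A[p] : Int) := by exact_mod_cast hhit
            omega
          rw [if_neg this]
        have hnoshrink : (foldA A L R p).2.1 ≠ R - L + 1 := by
          rw [hhv]; exact hf
        have hA : foldA A L R (p + 1) =
            ((foldA A L R p).1.insert A[p] ((foldA A L R p).1.getD A[p] 0 + 1),
              (foldA A L R p).2.1, (foldA A L R p).2.2.1, (foldA A L R p).2.2.2) := by
          rw [foldA_succ]; simp only [stepA]; rw [hgetD, if_pos hreqx]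
          simp only
          rw [hifeq]
          exact shrink_noop _ _ _ _ _ _ _ _ _ hnoshrink
        have hBml : (foldB A L R (p + 1)).2 = (foldB A L R p).2 := by
          rw [hB2, if_neg hnf']
        refine ⟨hB1, ?_, ?_, ?_, ?_⟩
        · rw [hA, hBml]; exact h2
        · intro v hv
          rw [hA]
          simp only
          rw [h5, hPs]
          simp only [List.drop_zero]
          by_cases hvx : v = A[p]
          · subst hvx
            rw [PySem.Dict.getD_insert_self, hcnt, count_snoc_self]
            push_cast; ring
          · rw [PySem.Dict.getD_insert_of_ne _ _ _ hvx, h3 v hv, hW0,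
              count_snoc_ne _ _ _ hvx]
        · rw [hA]
          simp only
          rw [h5]
          simp only [List.drop_zero]
          rw [hdP', hhv]
        · rw [if_neg hnf', hA]
          simp only
          exact h5
      · -- a brand-new required value
        have hxnotP : A[p] ∉ A.take p := by
          rw [← List.count_eq_zero]; omega
        have hxnotd : A[p] ∉ dsetL L R (A.take p) := fun h =>
          hxnotP ((mem_dsetL _ _ _ _).mp h).2
        have hdP' : dsetL L R (A.take (p + 1)) = dsetL L R (A.take p) ++ [A[p]] := by
          rw [hPs, dsetL_snoc, if_pos hreqx, set_add_of_not_mem _ _ hxnotd]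
        have hcnt0 : (A.take p).count A[p] = 0 := by omega
        have hone : ((foldA A L R p).1.insert A[p]
            ((foldA A L R p).1.getD A[p] 0 + 1)).getD A[p] 0 = 1 := by
          rw [PySem.Dict.getD_insert_self, hcnt, hcnt0]
          norm_num
        have hwcpre : ∀ v, L ≤ v ∧ v ≤ R →
            ((foldA A L R p).1.insert A[p] ((foldA A L R p).1.getD A[p] 0 + 1)).getD v 0
              = ((((A.take (p+1)).drop 0).count v : Nat) : Int) := by
          intro v hv
          simp only [List.drop_zero]
          rw [hPs]
          by_cases hvx : v = A[p]
          · subst hvx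
            rw [hone, count_snoc_self, hcnt0]
            norm_num
          · rw [PySem.Dict.getD_insert_of_ne _ _ _ hvx, h3 v hv, hW0,
              count_snoc_ne _ _ _ hvx]
        by_cases hfull' : ((dsetL L R (A.take p)).length : Int) + 1 = R - L + 1
        · -- first full coverage: the shrink loop fires for the first time
          have hf' : ((dsetL L R (A.take (p + 1))).length : Int) = R - L + 1 := by
            rw [hdP']
            simp only [List.length_append, List.length_cons, List.length_nil]
            push_cast
            omega
          have hne : (lpF L R (A.take (p+1))).values ≠ [] := by
            intro hemp
            have : ((p : Nat) : Int) ∈ (lpF L R (A.take (p+1))).values := by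
              rw [mem_values_lpF]
              refine ⟨A[p], p, hreqx, ?_, rfl⟩
              rw [hPs, lastIdx_snoc, if_pos rfl, hPl]
            rw [hemp] at this
            simp at this
          obtain ⟨mI', hmin'⟩ : ∃ mI',
              PySem.List.min? (lpF L R (A.take (p+1))).values (fun x => x) = some mI' := by
            cases hm : PySem.List.min? (lpF L R (A.take (p+1))).values (fun x => x) with
            | none => exact absurd ((PySem.List.min?_eq_none_iff _ _).mp hm) hne
            | some m => exact ⟨m, rfl⟩
          obtain ⟨mN', v0', hc', hreq0', hlast0', hminP'⟩ :=
            min_lpF_spec L R (A.take (p+1)) _ hmin'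
          subst hc'
          obtain ⟨wc', hshr, hwc'⟩ := shrink_run A L R p hp mN' v0' hreq0' hlast0' hminP'
            (mN' + 1) 0 (by omega) (by omega)
            ((foldA A L R p).1.insert A[p] ((foldA A L R p).1.getD A[p] 0 + 1))
            (foldA A L R p).2.2.1 hwcpre
          have hA : foldA A L R (p + 1) =
              (wc', R - L, pyMinOpt (foldA A L R p).2.2.1 ((p : Int) - (mN' : Int) + 1),
                mN' + 1) := by
            rw [foldA_succ]; simp only [stepA]; rw [hgetD, if_pos hreqx]
            rw [hone, if_pos rfl, hhv, h5]
            rw [show ((dsetL L R (A.take p)).length : Int) + 1 = R - L + 1 from hfull']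
            exact hshr
          have hdm' := dsetL_drop_min_succ L R (A.take (p+1)) mN' v0' hreq0' hlast0' hminP'
          have hBml : (foldB A L R (p + 1)).2
              = pyMinOpt (foldB A L R p).2 ((p : Int) - (mN' : Int) + 1) := by
            rw [hB2, if_pos hf', hmin']
          refine ⟨hB1, ?_, ?_, ?_, ?_⟩
          · rw [hA, hBml, h2]
          · intro v hv
            rw [hA]
            simp only
            exact hwc' v hv
          · rw [hA]
            simp only
            have h6 : ((dsetL L R ((A.take (p+1)).drop (mN' + 1))).length : Int) + 1
                = ((dsetL L R (A.take (p+1))).length : Int) := by exact_mod_cast hdm'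
            omega
          · rw [if_pos hf']
            obtain ⟨μ', hμ'eq, hμ'le⟩ := pyMinOpt_le (foldA A L R p).2.2.1 ((p : Int) - (mN' : Int) + 1)
            refine ⟨mN', hmin', by rw [hA], μ', ?_, by push_cast; omega⟩
            rw [hBml, ← h2, hμ'eq]
        · -- still not covering
          have hnf' : ¬ (((dsetL L R (A.take (p + 1))).length : Int) = R - L + 1) := by
            rw [hdP']
            simp only [List.length_append, List.length_cons, List.length_nil]
            push_cast
            omega
          have hnoshrink : ¬ ((if ((foldA A L R p).1.insert A[p]
              ((foldA A L R p).1.getD A[p] 0 + 1)).getD A[p] 0 = 1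
                then (foldA A L R p).2.1 + 1 else (foldA A L R p).2.1) = R - L + 1) := by
            rw [hone, if_pos rfl, hhv]
            omega
          have hA : foldA A L R (p + 1) =
              ((foldA A L R p).1.insert A[p] ((foldA A L R p).1.getD A[p] 0 + 1),
                (foldA A L R p).2.1 + 1, (foldA A L R p).2.2.1, (foldA A L R p).2.2.2) := by
            rw [foldA_succ]; simp only [stepA]; rw [hgetD, if_pos hreqx]
            rw [hone, if_pos rfl]
            rw [hone, if_pos rfl] at hnoshrink
            exact shrink_noop _ _ _ _ _ _ _ _ _ hnoshrink
          have hBml : (foldB A L R (p + 1)).2 = (foldB A L R p).2 := by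
            rw [hB2, if_neg hnf']
          refine ⟨hB1, ?_, ?_, ?_, ?_⟩
          · rw [hA, hBml]; exact h2
          · intro v hv
            rw [hA]
            simp only
            rw [h5, hPs]
            simp only [List.drop_zero]
            by_cases hvx : v = A[p]
            · subst hvx
              rw [PySem.Dict.getD_insert_self, hcnt, count_snoc_self, hcnt0]
              norm_num
            · rw [PySem.Dict.getD_insert_of_ne _ _ _ hvx, h3 v hv, hW0,
                count_snoc_ne _ _ _ hvx]
          · rw [hA]
            simp only
            rw [h5]
            simp only [List.drop_zero]
            rw [hdP', hhv]
            simp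
          · rw [if_neg hnf', hA]
            simp only
            exact h5
    · -- noise while not covering
      have hdP' : dsetL L R (A.take (p + 1)) = dsetL L R (A.take p) := by
        rw [hPs, dsetL_snoc, if_neg hreqx]
      have hnf' : ¬ (((dsetL L R (A.take (p + 1))).length : Int) = R - L + 1) := by
        rw [hdP']; exact hf
      have hA : foldA A L R (p + 1) = foldA A L R p := by
        rw [foldA_succ]; simp only [stepA]; rw [hgetD, if_neg hreqx]
        have : (foldA A L R p).2.1 ≠ R - L + 1 := by rw [hhv]; exact hf
        rw [shrink_noop _ _ _ _ _ _ _ _ _ this]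
      have hBml : (foldB A L R (p + 1)).2 = (foldB A L R p).2 := by
        rw [hB2, if_neg hnf']
      refine ⟨hB1, ?_, ?_, ?_, ?_⟩
      · rw [hA, hBml]; exact h2
      · intro v hv
        rw [hA, h3 v hv, hW0, h5, hPs]
        simp only [List.drop_zero]
        have hvx : v ≠ A[p] := fun h => hreqx (h ▸ hv)
        rw [count_snoc_ne _ _ _ hvx]
      · rw [hA, h4, hW0, h5]
        simp only [List.drop_zero]
        rw [hdP']
      · rw [if_neg hnf', hA]
        exact h5

theorem InvP_all (A : List Int) (L R : Int) (hneed : R - L + 1 ≠ 0) :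
    ∀ p, p ≤ A.length → InvP A L R p := by
  intro p
  induction p with
  | zero => intro _; exact InvP_zero A L R hneed
  | succ q ihq =>
    intro hle
    exact InvP_step A L R q (by omega) (ihq (by omega))

theorem solution_eq_alt (A : List Int) (L R : Int) (hpre : R - L + 1 ≠ 0 ∨ A = []) :
    solution A L R = solution_alt A L R := by
  rcases hpre with hneed | hnil
  · have hI := InvP_all A L R hneed A.length (le_refl _)
    rw [solution_eq_foldA, solution_alt_eq_foldB, hI.2.1]
  · subst hnil; rfl

-- ===== VERDICT (by name: the statement is the Claim_ definition above) =====
theorem solution_spec : Claim_equal_solution := by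
  intro A L R _ hpre
  unfold Spec_solution
  exact solution_eq_alt A L R hpre
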